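-- pv_equiv track=rewrite | github.com/fatjan/code-practices | calc_result.py | calculate_test_result
-- ===== SOURCE A (Python) =====
-- def calculate_test_result(scores):
--     total = 0
--
--     for i in range(len(scores)):
--         if i == 0:
--             if scores[i] == 'O':
--                 total += 1
--         elif i == 1:
--             if scores[i] == 'O' and scores[i-1] == 'O':
--                 total += 2
--             elif scores[i] == 'O':
--                 total += 1
--         else:
--             if scores[i] == 'O' and scores[i-1] == 'O' and scores[i-2] == 'O':
--                 total += 3
--             elif scores[i] == 'O' and scores[i-1] == 'O':
--                 total += 2
--             elif scores[i] == 'O':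
--                 total += 1
--     return total
-- ===== SOURCE B (Python) =====
-- def calculate_test_result(scores):
--     total = 0
--     streak = 0
--     for c in scores:
--         if c == 'O':
--             streak += 1
--             total += min(streak, 3)
--         else:
--             streak = 0
--     return total
-- ===== Notes on version B (the rewrite author's own statement) =====
-- stated objective: simpler
-- what changed: Replaces A's positional look-back at the previous two indices with i==0/i==1 special cases by a single running streak counter that adds min(streak, 3) per 'O'.
import Mathlib
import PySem

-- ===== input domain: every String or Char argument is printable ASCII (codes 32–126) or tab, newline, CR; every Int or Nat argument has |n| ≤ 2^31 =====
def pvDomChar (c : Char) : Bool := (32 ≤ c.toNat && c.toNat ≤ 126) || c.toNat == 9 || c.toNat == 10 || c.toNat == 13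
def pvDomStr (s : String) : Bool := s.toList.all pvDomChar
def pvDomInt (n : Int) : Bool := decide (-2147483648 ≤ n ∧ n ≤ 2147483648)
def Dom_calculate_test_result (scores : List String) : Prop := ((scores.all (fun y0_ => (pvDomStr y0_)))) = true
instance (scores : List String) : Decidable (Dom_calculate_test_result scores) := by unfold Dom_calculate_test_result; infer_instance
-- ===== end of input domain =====

-- B replaces A's positional look-back (with i==0/i==1 special cases) by one running streak counter; same O(n) cost, shorter.

-- ===== PORT A =====
-- A's loop body for index i (all indices accessed are in range, so getD is exact here).
def pvStepA (scores : List String) (total : Int) (i : Nat) : Int :=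
  if i = 0 then
    (if scores.getD i "" = "O" then total + 1 else total)
  else if i = 1 then
    (if scores.getD i "" = "O" ∧ scores.getD (i-1) "" = "O" then total + 2
     else if scores.getD i "" = "O" then total + 1 else total)
  else
    (if scores.getD i "" = "O" ∧ scores.getD (i-1) "" = "O" ∧ scores.getD (i-2) "" = "O" then total + 3
     else if scores.getD i "" = "O" ∧ scores.getD (i-1) "" = "O" then total + 2
     else if scores.getD i "" = "O" then total + 1 else total)

def calculate_test_result (scores : List String) : Int :=
  (List.range scores.length).foldl (pvStepA scores) 0

-- ===== PORT B =====
-- state = (total, streak)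
def pvStepB (st : Int × Int) (c : String) : Int × Int :=
  if c = "O" then (st.1 + min (st.2 + 1) 3, st.2 + 1) else (st.1, 0)

def calculate_test_result_alt (scores : List String) : Int :=
  (scores.foldl pvStepB (0, 0)).1

-- ===== PRECONDITION & SPEC =====
def Spec_calculate_test_result (scores : List String) (out : Int) : Prop := out = calculate_test_result_alt scores
instance (scores : List String) (out : Int) : Decidable (Spec_calculate_test_result scores out) := by unfold Spec_calculate_test_result; infer_instance

-- ===== CLAIM (what is proved, stated in full; the proofs are below) =====
def Claim_equal_calculate_test_result : Prop := ∀ (scores : List String), Dom_calculate_test_result scores → Spec_calculate_test_result scores (calculate_test_result scores)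

-- ===== LEMMAS AND PROOFS =====

-- B's fold with the streak as a Nat (the streak is always a nonnegative count).
def pvStepN (st : Int × Nat) (c : String) : Int × Nat :=
  if c = "O" then (st.1 + min ((st.2 : Int) + 1) 3, st.2 + 1) else (st.1, 0)

theorem foldB_eq_foldN (xs : List String) (t : Int) (s : Nat) :
    xs.foldl pvStepB (t, (s : Int)) =
      ((xs.foldl pvStepN (t, s)).1, ((xs.foldl pvStepN (t, s)).2 : Int)) := by
  induction xs generalizing t s with
  | nil => simp
  | cons c xs ih =>
    by_cases h : c = "O"
    · simpa [pvStepB, pvStepN, h] using ih (t + min ((s : Int) + 1) 3) (s + 1)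
    · simpa [pvStepB, pvStepN, h] using ih t 0

-- Invariant relating A's look-back at positions n-1, n-2 to B's streak after the first n elements.
def pvInv (scores : List String) (n s : Nat) : Prop :=
  s ≤ n ∧ (∀ k, k < s → scores.getD (n-1-k) "" = "O") ∧
    (s < n → scores.getD (n-1-s) "" ≠ "O")

theorem drop_cons (scores : List String) (n : Nat) (h : n < scores.length) :
    scores.drop n = scores.getD n "" :: scores.drop (n+1) := by
  rw [List.drop_eq_getElem_cons h, List.getD_eq_getElem _ _ h]

theorem main_lemma (scores : List String) (m : Nat) :
    ∀ n t s, n + m = scores.length → pvInv scores n s →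
      (List.range' n m).foldl (pvStepA scores) t = ((scores.drop n).foldl pvStepN (t, s)).1 := by
  induction m with
  | zero =>
    intro n t s hn _
    have : scores.drop n = [] := List.drop_eq_nil_of_le (by omega)
    simp [this]
  | succ m ih =>
    intro n t s hn hinv
    have hlt : n < scores.length := by omega
    obtain ⟨hsn, hO, hX⟩ := hinv
    rw [List.range'_succ, List.foldl_cons, drop_cons scores n hlt, List.foldl_cons]
    simp only [List.getD_eq_getElem?_getD] at hO hX ⊢
    by_cases hcO : scores[n]?.getD "" = "O"
    · -- A adds min(s+1,3); new streak s+1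
      have hstep : pvStepA scores t n = t + min ((s : Nat) + 1 : Int) 3 := by
        unfold pvStepA
        simp only [List.getD_eq_getElem?_getD]
        rcases Nat.lt_or_ge n 2 with h2 | h2
        · interval_cases n
          · have hs0 : s = 0 := by omega
            simp [hcO, hs0]
          · rcases Nat.lt_or_ge s 1 with hs | hs
            · have hs0 : s = 0 := by omega
              have hprev := hX (by omega)
              rw [hs0] at hprev
              simp at hprev
              simp [hcO, hprev, hs0]
            · have hs1 : s = 1 := by omega
              have h1 := hO 0 (by omega)
              simp at h1
              simp [hcO, h1, hs1]
        · have hn0 : ¬ n = 0 := by omega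
          have hn1 : ¬ n = 1 := by omega
          rcases Nat.lt_or_ge s 1 with hs | hs
          · have hs0 : s = 0 := by omega
            have hprev := hX (by omega)
            rw [hs0] at hprev
            simp at hprev
            simp [hn0, hn1, hcO, hprev, hs0]
          · rcases Nat.lt_or_ge s 2 with hs2 | hs2
            · have hs1 : s = 1 := by omega
              have h1 := hO 0 (by omega)
              have hprev2 := hX (by omega)
              rw [hs1] at hprev2
              simp at h1
              have e2 : n - 1 - 1 = n - 2 := by omega
              rw [e2] at hprev2
              simp [hn0, hn1, hcO, h1, hprev2, hs1]
            · have h1 := hO 0 (by omega)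
              have h2' := hO 1 hs2
              simp at h1
              have e2 : n - 1 - 1 = n - 2 := by omega
              rw [e2] at h2'
              have hmin : min ((s : Nat) + 1 : Int) 3 = 3 := by
                have : (2 : Int) ≤ (s : Int) := by exact_mod_cast hs2
                omega
              simp [hn0, hn1, hcO, h1, h2', hmin]
      have hinv' : pvInv scores (n+1) (s+1) := by
        refine ⟨by omega, ?_, ?_⟩
        · intro k hk
          rcases k with _ | k
          · simpa using hcO
          · have e : n + 1 - 1 - (k+1) = n - 1 - k := by omega
            rw [e]
            simpa using hO k (by omega)
        · intro h
          have e : n + 1 - 1 - (s+1) = n - 1 - s := by omega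
          rw [e]
          simpa using hX (by omega)
      rw [hstep, ih (n+1) (t + min ((s : Nat) + 1 : Int) 3) (s+1) (by omega) hinv']
      simp [pvStepN, hcO]
    · -- not "O": A adds nothing; streak resets
      have hstep : pvStepA scores t n = t := by
        unfold pvStepA
        simp only [List.getD_eq_getElem?_getD]
        simp [hcO]
      have hinv' : pvInv scores (n+1) 0 := by
        refine ⟨by omega, by omega, ?_⟩
        intro _
        simpa using hcO
      rw [hstep, ih (n+1) t 0 (by omega) hinv']
      simp [pvStepN, hcO]

-- ===== VERDICT (by name: the statement is the Claim_ definition above) =====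
theorem calculate_test_result_spec : Claim_equal_calculate_test_result := by
  intro scores _
  unfold Spec_calculate_test_result calculate_test_result calculate_test_result_alt
  have h := main_lemma scores scores.length 0 0 0 (by omega) ⟨Nat.zero_le _, by omega, by omega⟩
  rw [List.range_eq_range']
  rw [h]
  have hb := foldB_eq_foldN scores 0 0
  simp at hb
  simp [hb]
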